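-- pv_equiv track=rewrite | github.com/swtaktak/PS_Archive | BOJ 풀이/11761.py | outcard
-- ===== SOURCE A (Python) =====
-- from collections import deque
--
-- def outcard(card):
--     card_list = [i for i in range(1, card + 1)]
--     count = 0
--     while True:
--         count += 1
--         left = deque()
--         right = deque()
--         # step 1: card를 left_right 으로 나눈다.
--         if card % 2 == 0:
--             for i in range(card):
--                 if i < card // 2:
--                     left.append(card_list[i])
--                 else:
--                     right.append(card_list[i])
--         else:
--              for i in range(card):
--                 if i <= card // 2:
--                     left.append(card_list[i])
--                 else:
--                     right.append(card_list[i])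
--         card_list = []
--         for i in range(card):
--             if i % 2 == 0:
--                 cur_elt = left.popleft()
--                 card_list.append(cur_elt)
--             else:
--                 cur_elt = right.popleft()
--                 card_list.append(cur_elt)
--         if card_list[0] == 1 and card_list[1] == 2:
--             break
--     return count
-- ===== SOURCE B (Python) =====
-- def outcard(card):
--     # The out-shuffle sends the value at position p to position 2p (p < half)
--     # or to 2(p-half)+1 (p >= half), where half = ceil(card/2); value 1 sits at
--     # position 0, which is a fixed point, so the deck's front reads (1, 2) again
--     # exactly when the value occupying index 1 is 2 again.  Track only which
--     # original position's card sits at index 1: one shuffle puts at index i the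
--     # card previously at index i//2 (i even) or half + i//2 (i odd).
--     half = (card + 1) // 2
--     pos = 1
--     count = 0
--     while True:
--         count += 1
--         pos = pos // 2 if pos % 2 == 0 else half + pos // 2
--         if pos == 1:
--             return count
-- ===== Notes on version B (the rewrite author's own statement) =====
-- stated objective: faster
-- what changed: Instead of simulating the whole deck every shuffle, B tracks only the index whose card ends up at position 1 (position 0 is a fixed point of the out-shuffle), so each shuffle costs O(1) instead of O(n).
-- outside the precondition, e.g. on outcard(1): A raises IndexError, B returns 1
import Mathlib
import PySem

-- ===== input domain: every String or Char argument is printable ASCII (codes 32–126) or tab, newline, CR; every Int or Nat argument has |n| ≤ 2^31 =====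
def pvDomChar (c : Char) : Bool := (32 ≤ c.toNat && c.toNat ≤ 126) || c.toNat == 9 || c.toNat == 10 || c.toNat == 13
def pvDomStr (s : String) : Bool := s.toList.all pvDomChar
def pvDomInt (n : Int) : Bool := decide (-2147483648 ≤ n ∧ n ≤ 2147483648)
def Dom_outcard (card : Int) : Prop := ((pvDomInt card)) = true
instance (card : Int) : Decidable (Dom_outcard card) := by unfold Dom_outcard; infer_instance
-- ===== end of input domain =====

-- B tracks only the index whose card lands at position 1 each out-shuffle (O(1) per
-- shuffle) instead of rebuilding the whole deck (O(n) per shuffle); same count returned.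

-- ===== PORT A =====
-- one pass of A's while-body: split into left/right deques, then interleave.
-- Python-list appends are accumulated with cons and reversed after each loop, and
-- the reads card_list[i] of the 'for i in range(card)' are performed by pairing
-- range(card) with card_list (exact: card_list always has length card), so the
-- port evaluates in linear time per pass.
def pvShuffleA (card : Int) (card_list : List Int) : List Int :=
  let lr : List Int × List Int :=
    if PySem.Int.mod card 2 == 0 then
      ((PySem.List.pyRange 0 card 1).zip card_list).foldl
        (fun (p : List Int × List Int) ix =>
          if ix.1 < PySem.Int.floordiv card 2 then (ix.2 :: p.1, p.2)
          else (p.1, ix.2 :: p.2)) ([], [])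
    else
      ((PySem.List.pyRange 0 card 1).zip card_list).foldl
        (fun (p : List Int × List Int) ix =>
          if ix.1 ≤ PySem.Int.floordiv card 2 then (ix.2 :: p.1, p.2)
          else (p.1, ix.2 :: p.2)) ([], [])
  let left := lr.1.reverse
  let right := lr.2.reverse
  ((PySem.List.pyRange 0 card 1).foldl
      (fun (st : List Int × List Int × List Int) i =>
        if PySem.Int.mod i 2 == 0 then
          match st.2.1 with          -- left.popleft(); empty deque unreachable under Pre_
          | [] => st
          | x :: l' => (x :: st.1, l', st.2.2)
        else
          match st.2.2 with          -- right.popleft(); empty deque unreachable under Pre_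
          | [] => st
          | x :: r' => (x :: st.1, st.2.1, r')) ([], left, right)).1.reverse

-- A's 'while True'; fuel card.toNat always suffices under Pre_ (the loop count is
-- the cycle length of index 1 under the shuffle permutation, which is < card)
def pvLoopA (card : Int) : Nat → List Int → Int → Int
  | 0, _, count => count
  | fuel+1, card_list, count =>
      let count := count + 1
      let cl := pvShuffleA card card_list
      if PySem.List.pyGetD cl 0 0 == 1 && PySem.List.pyGetD cl 1 0 == 2 then count
      else pvLoopA card fuel cl count

def outcard (card : Int) : Int :=
  pvLoopA card card.toNat (PySem.List.pyRange 1 (card + 1) 1) 0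

-- ===== PORT B =====
def pvLoopB (half : Int) : Nat → Int → Int → Int
  | 0, _, count => count
  | fuel+1, pos, count =>
      let count := count + 1
      let pos := if PySem.Int.mod pos 2 == 0 then PySem.Int.floordiv pos 2
                 else half + PySem.Int.floordiv pos 2
      if pos == 1 then count else pvLoopB half fuel pos count

def outcard_alt (card : Int) : Int :=
  pvLoopB (PySem.Int.floordiv (card + 1) 2) card.toNat 1 0

-- ===== PRECONDITION & SPEC =====
-- Pre_ excludes card ≤ 1, where A raises IndexError (card_list[0] / card_list[1]).
def Pre_outcard (card : Int) : Prop := 2 ≤ card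
instance (card : Int) : Decidable (Pre_outcard card) := by unfold Pre_outcard; infer_instance
def pvWitness_outcard : Int := 8

def Spec_outcard (card : Int) (out : Int) : Prop := out = outcard_alt card
instance (card : Int) (out : Int) : Decidable (Spec_outcard card out) := by unfold Spec_outcard; infer_instance

-- ===== CLAIM (what is proved, stated in full; the proofs are below) =====
def Claim_equal_outcard : Prop := ∀ (card : Int), Dom_outcard card → Pre_outcard card → Spec_outcard card (outcard card)

-- ===== LEMMAS AND PROOFS =====

-- half = ceil(n/2), and the position map of one out-shuffle read at the output side:
-- output index j carries the card previously at index pvF n j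
def pvHalf (n : Nat) : Nat := (n + 1) / 2
def pvF (n j : Nat) : Nat := if j % 2 = 0 then j / 2 else pvHalf n + j / 2

-- interleave two queues front-first, alternating, left first
def pvMix : List Int → List Int → List Int
  | [], _ => []
  | x :: l, r => x :: pvMix r l
termination_by l r => l.length + r.length
decreasing_by simp; omega

theorem pvMix_nil (r : List Int) : pvMix [] r = [] := by rw [pvMix.eq_def]
theorem pvMix_cons (x : Int) (l r : List Int) : pvMix (x :: l) r = x :: pvMix r l := by
  rw [pvMix.eq_def]

theorem pvF_lt (n : Nat) {j : Nat} (hj : j < n) : pvF n j < n := by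
  unfold pvF pvHalf; split <;> omega

theorem pvF_iter_zero (n k : Nat) : (pvF n)^[k] 0 = 0 := by
  apply Function.iterate_fixed
  unfold pvF pvHalf; norm_num

theorem pvMix_length (l r : List Int) (h1 : r.length ≤ l.length) (h2 : l.length ≤ r.length + 1) :
    (pvMix l r).length = l.length + r.length := by
  fun_induction pvMix l r with
  | case1 r => simp_all
  | case2 x l r ih =>
      simp only [List.length_cons] at *
      rw [ih (by omega) (by omega)]
      omega

theorem pvMix_getD (l r : List Int) : ∀ j : Nat, r.length ≤ l.length → l.length ≤ r.length + 1 →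
    j < l.length + r.length →
    (pvMix l r).getD j 0 = if j % 2 = 0 then l.getD (j / 2) 0 else r.getD (j / 2) 0 := by
  fun_induction pvMix l r with
  | case1 r => intro j h1 _ hj; simp only [List.length_nil] at h1 hj; omega
  | case2 x l r ih =>
      intro j h1 h2 hj
      match j with
      | 0 => simp
      | Nat.succ j =>
          simp only [List.getD_cons_succ]
          rw [ih j (by simp at h2 ⊢; omega) (by simp at h1 ⊢; omega) (by simp at hj ⊢; omega)]
          by_cases hp : j % 2 = 0
          · simp [hp, show ¬((j+1) % 2 = 0) by omega, show (j+1)/2 = j/2 by omega]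
          · simp [hp, show (j+1) % 2 = 0 by omega, show (j+1)/2 = j/2 + 1 by omega]

-- the left/right-building fold is take/drop at the split point
theorem pv_map_pyGetD_range_take (M : List Int) (h : Nat) (hle : h ≤ M.length) :
    (PySem.List.pyRange 0 (h : Int) 1).map (fun i => PySem.List.pyGetD M i 0) = M.take h := by
  induction h with
  | zero => simp [PySem.List.pyRange_one_eq_nil]
  | succ h ih =>
      rw [show ((h + 1 : Nat) : Int) = (h : Int) + 1 by push_cast; ring,
        PySem.List.pyRange_one_succ_right (by exact_mod_cast Nat.zero_le h), List.map_append,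
        ih (by omega), List.take_add_one]
      simp [List.getElem?_eq_getElem (show h < M.length by omega)]

-- pairing a fresh index range with the list is Python's enumerate
theorem pv_zip_enum (M : List Int) : ∀ (a : Int),
    (PySem.List.pyRange a (a + (M.length : Int)) 1).zip M = PySem.List.enumerate M a := by
  induction M with
  | nil => intro a; simp [PySem.List.pyRange_one_eq_nil, PySem.List.enumerate]
  | cons x M ih =>
      intro a
      rw [PySem.List.pyRange_one_cons (by simp only [List.length_cons]; push_cast; omega),
        show a + ((x :: M).length : Int) = (a+1) + (M.length : Int) by
          simp only [List.length_cons]; push_cast; ring]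
      simp only [List.zip_cons_cons, ih (a+1)]
      simp [PySem.List.enumerate]

theorem pv_build_lr (M : List Int) (h : Nat) (hle : h ≤ M.length) :
    ((PySem.List.pyRange 0 (M.length : Int) 1).zip M).foldl
      (fun (p : List Int × List Int) ix =>
        if ix.1 < (h : Int) then (ix.2 :: p.1, p.2)
        else (p.1, ix.2 :: p.2)) ([], []) =
    ((M.take h).reverse, (M.drop h).reverse) := by
  rw [show (PySem.List.pyRange 0 (M.length : Int) 1).zip M = PySem.List.enumerate M 0 from by
      simpa using pv_zip_enum M 0]
  rw [PySem.List.enumerate_eq_map_pyRange M 0, List.foldl_map]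
  rw [show PySem.List.len M = (M.length : Int) from PySem.List.len_eq M]
  rw [PySem.List.pyRange_one_append 0 (h : Int) (M.length : Int) (by exact_mod_cast Nat.zero_le h)
      (by exact_mod_cast hle), List.foldl_append]
  have h1 : (PySem.List.pyRange 0 (h : Int) 1).foldl
      (fun (p : List Int × List Int) i =>
        if i < (h : Int) then (PySem.List.pyGetD M i 0 :: p.1, p.2)
        else (p.1, PySem.List.pyGetD M i 0 :: p.2)) ([], []) = ((M.take h).reverse, []) := by
    rw [PySem.List.foldl_congr_mem _ _
      (fun (p : List Int × List Int) i => (PySem.List.pyGetD M i 0 :: p.1, p.2)) _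
      (fun acc x hx => if_pos (PySem.List.mem_pyRange_one.1 hx).2),
      PySem.List.foldl_prod_mk (fun acc i => PySem.List.pyGetD M i 0 :: acc) (fun acc _ => acc),
      List.foldl_flip_cons_eq_append, List.append_nil,
      pv_map_pyGetD_range_take M h hle, List.foldl_fixed]
  rw [h1, PySem.List.foldl_congr_mem _ _
      (fun (p : List Int × List Int) i => (p.1, PySem.List.pyGetD M i 0 :: p.2)) _
      (fun acc x hx => if_neg (by have := (PySem.List.mem_pyRange_one.1 hx).1; omega)),
    PySem.List.foldl_prod_mk (fun acc _ => acc) (fun acc i => PySem.List.pyGetD M i 0 :: acc),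
    List.foldl_flip_cons_eq_append, List.append_nil, List.foldl_fixed]
  have h2 : (PySem.List.pyRange (h : Int) (M.length : Int) 1).map
      (fun j => PySem.List.pyGetD M j 0) = M.drop h := by
    have := PySem.List.map_pyGetD_pyRange M 0 (a := (h : Int)) (by exact_mod_cast Nat.zero_le h)
    simpa using this
  rw [h2]

-- the interleaving step function of A's second loop (named for proof convenience;
-- definitionally equal to the lambda in pvShuffleA)
def pvStepI (st : List Int × List Int × List Int) (i : Int) : List Int × List Int × List Int :=
  if PySem.Int.mod i 2 == 0 then
    match st.2.1 with
    | [] => st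
    | x :: l' => (x :: st.1, l', st.2.2)
  else
    match st.2.2 with
    | [] => st
    | x :: r' => (x :: st.1, st.2.1, r')

-- the interleaving fold is pvMix, for any even starting index
theorem pv_inter (m : Nat) : ∀ (a : Nat) (acc l r : List Int),
    (l.length = (m+1)/2 → r.length = m/2 →
      ((PySem.List.pyRange (2*(a:Int)) (2*(a:Int)+(m:Int)) 1).foldl pvStepI (acc, l, r)).1
        = (pvMix l r).reverse ++ acc)
    ∧ (l.length = m/2 → r.length = (m+1)/2 →
      ((PySem.List.pyRange (2*(a:Int)+1) (2*(a:Int)+1+(m:Int)) 1).foldl pvStepI (acc, l, r)).1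
        = (pvMix r l).reverse ++ acc) := by
  induction m with
  | zero =>
      intro a acc l r
      constructor
      · intro hl hr
        rw [show 2*(a:Int)+((0:Nat):Int) = 2*(a:Int) by norm_num,
          PySem.List.pyRange_one_eq_nil le_rfl]
        rw [List.length_eq_zero_iff.1 (by omega : l.length = 0),
          List.length_eq_zero_iff.1 (by omega : r.length = 0)]
        simp [pvMix_nil]
      · intro hl hr
        rw [show 2*(a:Int)+1+((0:Nat):Int) = 2*(a:Int)+1 by norm_num,
          PySem.List.pyRange_one_eq_nil le_rfl]
        rw [List.length_eq_zero_iff.1 (by omega : l.length = 0),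
          List.length_eq_zero_iff.1 (by omega : r.length = 0)]
        simp [pvMix_nil]
  | succ m ih =>
      intro a acc l r
      constructor
      · intro hl hr
        cases l with
        | nil => simp at hl; omega
        | cons x l' =>
          rw [PySem.List.pyRange_one_cons
            (by push_cast; omega : 2*(a:Int) < 2*(a:Int)+(((m+1):Nat):Int))]
          rw [List.foldl_cons]
          rw [show pvStepI (acc, x :: l', r) (2*(a:Int)) = (x :: acc, l', r) from by
            simp [pvStepI]]
          rw [show 2*(a:Int)+(((m+1):Nat):Int) = (2*(a:Int)+1)+((m:Nat):Int) by push_cast; ring]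
          rw [(ih a (x :: acc) l' r).2 (by simp at hl ⊢; omega) (by omega)]
          rw [pvMix_cons, List.reverse_cons, List.append_assoc, List.singleton_append]
      · intro hl hr
        cases r with
        | nil => simp at hr; omega
        | cons x r' =>
          rw [PySem.List.pyRange_one_cons
            (by push_cast; omega : 2*(a:Int)+1 < 2*(a:Int)+1+(((m+1):Nat):Int))]
          rw [List.foldl_cons]
          rw [show pvStepI (acc, l, x :: r') (2*(a:Int)+1) = (x :: acc, l, r') from by
            simp [pvStepI]]
          rw [show 2*(a:Int)+1+(((m+1):Nat):Int) = (2*(a:Int)+1+1)+((m:Nat):Int) by push_cast; ring,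
            show 2*(a:Int)+1+1 = 2*(((a+1:Nat)):Int) by push_cast; ring]
          rw [(ih (a+1) (x :: acc) l r').1 (by omega) (by simp at hr ⊢; omega)]
          rw [pvMix_cons, List.reverse_cons, List.append_assoc, List.singleton_append]

-- the '≤'-conditioned variant of the split fold (A's odd-deck branch)
theorem pv_build_lr_le (M : List Int) (h : Nat) (hle : h + 1 ≤ M.length) :
    ((PySem.List.pyRange 0 (M.length : Int) 1).zip M).foldl
      (fun (p : List Int × List Int) ix =>
        if ix.1 ≤ (h : Int) then (ix.2 :: p.1, p.2)
        else (p.1, ix.2 :: p.2)) ([], []) =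
    ((M.take (h+1)).reverse, (M.drop (h+1)).reverse) := by
  have hcong : ∀ (p : List Int × List Int), ∀ ix ∈ (PySem.List.pyRange 0 (M.length : Int) 1).zip M,
      (if ix.1 ≤ (h : Int) then (ix.2 :: p.1, p.2) else (p.1, ix.2 :: p.2)) =
      (if ix.1 < ((h+1 : Nat) : Int) then (ix.2 :: p.1, p.2) else (p.1, ix.2 :: p.2)) := by
    intro p ix _
    by_cases hc : ix.1 ≤ (h : Int)
    · rw [if_pos hc, if_pos (by push_cast; omega)]
    · rw [if_neg hc, if_neg (by push_cast at hc ⊢; omega)]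
  rw [PySem.List.foldl_congr_mem _ _ _ _ hcong]
  exact pv_build_lr M (h+1) hle

-- pvMix applied to the two halves is exactly reading M through pvF
theorem pvMix_take_drop (n : Nat) (hn : 2 ≤ n) (M : List Int) (hM : M.length = n) :
    pvMix (M.take (pvHalf n)) (M.drop (pvHalf n)) =
      (List.range n).map (fun j => M.getD (pvF n j) 0) := by
  have hhalf : pvHalf n ≤ n ∧ n - pvHalf n ≤ pvHalf n ∧ pvHalf n ≤ (n - pvHalf n) + 1 := by
    unfold pvHalf; omega
  have hlt : (M.take (pvHalf n)).length = pvHalf n := by simp [hM]; unfold pvHalf; omega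
  have hld : (M.drop (pvHalf n)).length = n - pvHalf n := by simp [hM]
  apply List.ext_getElem
  · rw [pvMix_length _ _ (by omega) (by omega)]; simp [hlt, hld]; omega
  · intro j h1 h2
    have hjn : j < n := by simpa using h2
    rw [List.getElem_map, List.getElem_range]
    rw [← List.getD_eq_getElem _ 0 h1,
      pvMix_getD _ _ j (by omega) (by omega) (by rw [hlt, hld]; omega)]
    by_cases hp : j % 2 = 0
    · have hj2 : j / 2 < pvHalf n := by unfold pvHalf; omega
      rw [if_pos hp, List.getD_eq_getElem _ 0 (by omega),
        List.getD_eq_getElem _ 0 (by rw [hM]; exact pvF_lt n hjn), List.getElem_take]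
      congr 1
      unfold pvF; rw [if_pos hp]
    · have hj2 : j / 2 < n - pvHalf n := by unfold pvHalf; omega
      rw [if_neg hp, List.getD_eq_getElem _ 0 (by omega),
        List.getD_eq_getElem _ 0 (by rw [hM]; exact pvF_lt n hjn), List.getElem_drop]
      congr 1
      unfold pvF; rw [if_neg hp]

-- one pass of A's body on an arbitrary deck of size n
theorem pvShuffleA_char (n : Nat) (hn : 2 ≤ n) (M : List Int) (hM : M.length = n) :
    pvShuffleA (n : Int) M = (List.range n).map (fun j => M.getD (pvF n j) 0) := by
  have hm2 : PySem.Int.mod (n:Int) 2 = ((n % 2 : Nat) : Int) := by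
    rw [show (2:Int) = ((2:Nat):Int) by norm_num, PySem.Int.mod_natCast]
  have hfd : PySem.Int.floordiv (n:Int) 2 = ((n / 2 : Nat) : Int) := by
    rw [show (2:Int) = ((2:Nat):Int) by norm_num, PySem.Int.floordiv_natCast]
  have hint := (pv_inter n 0 [] (M.take (pvHalf n)) (M.drop (pvHalf n))).1
    (by simp [hM]; unfold pvHalf; omega) (by simp [hM]; unfold pvHalf; omega)
  norm_num at hint
  by_cases hpar : n % 2 = 0
  · have hc : (PySem.Int.mod (n:Int) 2 == 0) = true := by rw [hm2, hpar]; decide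
    have hlr := pv_build_lr M (n/2) (by omega)
    rw [hM] at hlr
    unfold pvShuffleA
    rw [hc, if_pos rfl]
    simp only [hfd]
    rw [hlr, show n/2 = pvHalf n by unfold pvHalf; omega]
    simp only [List.reverse_reverse]
    rw [show (List.foldl (fun (st : List Int × List Int × List Int) i =>
        if PySem.Int.mod i 2 == 0 then
          match st.2.1 with
          | [] => st
          | x :: l' => (x :: st.1, l', st.2.2)
        else
          match st.2.2 with
          | [] => st
          | x :: r' => (x :: st.1, st.2.1, r'))
        ([], M.take (pvHalf n), M.drop (pvHalf n)) (PySem.List.pyRange 0 (n:Int) 1)).1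
      = (List.foldl pvStepI ([], M.take (pvHalf n), M.drop (pvHalf n))
          (PySem.List.pyRange 0 (n:Int) 1)).1 from rfl]
    rw [hint, List.reverse_reverse]
    exact pvMix_take_drop n hn M hM
  · have hc : (PySem.Int.mod (n:Int) 2 == 0) = false := by
      rw [hm2]
      simp only [beq_eq_false_iff_ne, ne_eq, Int.natCast_eq_zero]
      omega
    have hlr := pv_build_lr_le M (n/2) (by omega)
    rw [hM] at hlr
    unfold pvShuffleA
    rw [hc, if_neg (by simp)]
    simp only [hfd]
    rw [hlr, show n/2+1 = pvHalf n by unfold pvHalf; omega]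
    simp only [List.reverse_reverse]
    rw [show (List.foldl (fun (st : List Int × List Int × List Int) i =>
        if PySem.Int.mod i 2 == 0 then
          match st.2.1 with
          | [] => st
          | x :: l' => (x :: st.1, l', st.2.2)
        else
          match st.2.2 with
          | [] => st
          | x :: r' => (x :: st.1, st.2.1, r'))
        ([], M.take (pvHalf n), M.drop (pvHalf n)) (PySem.List.pyRange 0 (n:Int) 1)).1
      = (List.foldl pvStepI ([], M.take (pvHalf n), M.drop (pvHalf n))
          (PySem.List.pyRange 0 (n:Int) 1)).1 from rfl]
    rw [hint, List.reverse_reverse]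
    exact pvMix_take_drop n hn M hM

-- the two loops agree along the whole iteration, for every fuel
theorem pv_loops_eq (n : Nat) (hn : 2 ≤ n) : ∀ (fuel k : Nat) (count : Int),
    pvLoopA (n : Int) fuel ((List.range n).map (fun j => (((pvF n)^[k] j : Nat) : Int) + 1)) count
    = pvLoopB ((pvHalf n : Nat) : Int) fuel (((pvF n)^[k] 1 : Nat) : Int) count := by
  intro fuel
  induction fuel with
  | zero => intro k count; rfl
  | succ fuel ih =>
      intro k count
      simp only [pvLoopA, pvLoopB]
      rw [pvShuffleA_char n hn _ (by simp)]
      have hmapeq : (List.range n).map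
            (fun j => ((List.range n).map
              (fun j => (((pvF n)^[k] j : Nat) : Int) + 1)).getD (pvF n j) 0)
          = (List.range n).map (fun j => (((pvF n)^[k+1] j : Nat) : Int) + 1) :=
        List.map_congr_left (fun j hj => by
          rw [PySem.List.getD_map_range _ n (pvF n j) 0 (pvF_lt n (List.mem_range.1 hj)),
            ← Function.iterate_succ_apply])
      rw [hmapeq]
      rw [PySem.List.pyGetD_ofNat' _ 0 0, PySem.List.pyGetD_ofNat' _ 1 0,
        PySem.List.getD_map_range _ n 0 0 (by omega), PySem.List.getD_map_range _ n 1 0 (by omega),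
        pvF_iter_zero]
      have hpos : (if PySem.Int.mod (((pvF n)^[k] 1 : Nat) : Int) 2 == 0 then
            PySem.Int.floordiv (((pvF n)^[k] 1 : Nat) : Int) 2
          else ((pvHalf n : Nat) : Int) + PySem.Int.floordiv (((pvF n)^[k] 1 : Nat) : Int) 2)
          = (((pvF n)^[k+1] 1 : Nat) : Int) := by
        rw [show (2:Int) = ((2:Nat):Int) by norm_num, PySem.Int.mod_natCast,
          PySem.Int.floordiv_natCast, Function.iterate_succ_apply']
        generalize (pvF n)^[k] 1 = p0
        unfold pvF
        by_cases hp : p0 % 2 = 0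
        · rw [if_pos (by rw [hp]; decide), if_pos hp]
        · rw [if_neg (by simp only [beq_iff_eq, Int.natCast_eq_zero]; omega),
            if_neg hp]
          push_cast; ring
      rw [hpos]
      have hcond : ((((0:Nat):Int) + 1 == 1) && ((((pvF n)^[k+1] 1 : Nat) : Int) + 1 == 2))
          = ((((pvF n)^[k+1] 1 : Nat) : Int) == 1) := by
        rw [show (((0:Nat):Int) + 1 == 1) = true by decide, Bool.true_and]
        exact Bool.eq_iff_iff.2 (by simp only [beq_iff_eq]; omega)
      rw [hcond]
      by_cases hb : ((((pvF n)^[k+1] 1 : Nat) : Int) == 1) = true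
      · rw [if_pos hb, if_pos hb]
      · rw [if_neg hb, if_neg hb]
        exact ih (k+1) (count + 1)

-- ===== VERDICT (by name: the statement is the Claim_ definition above) =====
theorem outcard_spec : Claim_equal_outcard := by
  unfold Claim_equal_outcard Spec_outcard Pre_outcard
  intro card _ hpre
  obtain ⟨n, rfl⟩ : ∃ n : Nat, card = (n : Int) :=
    ⟨card.toNat, (Int.toNat_of_nonneg (by omega)).symm⟩
  have hn : 2 ≤ n := by exact_mod_cast hpre
  unfold outcard outcard_alt
  have hinit : PySem.List.pyRange 1 ((n:Int)+1) 1
      = (List.range n).map (fun j => (((pvF n)^[0] j : Nat) : Int) + 1) := by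
    rw [PySem.List.pyRange_one]
    simp [add_comm]
  have hhalf : PySem.Int.floordiv ((n:Int)+1) 2 = ((pvHalf n : Nat) : Int) := by
    rw [show ((n:Int)+1) = ((n+1 : Nat) : Int) by push_cast; ring,
      show (2:Int) = ((2:Nat):Int) by norm_num, PySem.Int.floordiv_natCast]
    rfl
  rw [hinit, hhalf, Int.toNat_natCast,
    show (1:Int) = (((pvF n)^[0] 1 : Nat) : Int) by simp]
  exact pv_loops_eq n hn n 0 0
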